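-- pv_equiv track=rewrite | github.com/constanzacordova/Carrera-Data-Science | 1. Introduccion a la programación con python/Ciclos y metodos/letra_x.py | letra_x
-- ===== SOURCE A (Python) =====
-- def letra_x(n):
--
--     linea = ""
--     if n%2 == 0:
--         n += 1
--
--     for i in range(n):
--         limite_sup = int((n-1)/2)
--         centro = int((n-1)/2)
--         limite_inf = int(centro + 1)
--
--         if i in range(limite_sup):
--             extremos = i
--             espacios_usados = 2*extremos + 2
--             centro = n - espacios_usados
--             linea += " "*extremos + "*" + " "*centro + "*" + "\n"
--
--         elif i == centro:
--             extremos = i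
--             linea += " "*extremos + "*"+"\n"
--
--         elif i in range(limite_inf, n):
--             extremos = n-i-1
--             espacios_usados = 2*extremos + 2
--             centro = n - espacios_usados
--             linea += " "*extremos + "*" + " "*centro + "*" + "\n"
--     return linea
-- ===== SOURCE B (Python) =====
-- def letra_x(n):
--     if n % 2 == 0:
--         n += 1
--     out = []
--     for i in range(n):
--         k = n - 1 - i
--         row = bytearray(b' ') * (max(i, k) + 1)
--         row[i] = 42
--         row[k] = 42
--         out.append(row.decode() + '\n')
--     return ''.join(out)
-- ===== Notes on version B (the rewrite author's own statement) =====
-- stated objective: simpler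
-- what changed: Replaces A's three-branch run-length arithmetic (upper/middle/lower rows assembled from counted space runs) with a uniform per-row rule: allocate a blank row reaching the outermost star column and write a star at the two mirrored columns; the middle row emerges when they coincide.
import Mathlib
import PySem

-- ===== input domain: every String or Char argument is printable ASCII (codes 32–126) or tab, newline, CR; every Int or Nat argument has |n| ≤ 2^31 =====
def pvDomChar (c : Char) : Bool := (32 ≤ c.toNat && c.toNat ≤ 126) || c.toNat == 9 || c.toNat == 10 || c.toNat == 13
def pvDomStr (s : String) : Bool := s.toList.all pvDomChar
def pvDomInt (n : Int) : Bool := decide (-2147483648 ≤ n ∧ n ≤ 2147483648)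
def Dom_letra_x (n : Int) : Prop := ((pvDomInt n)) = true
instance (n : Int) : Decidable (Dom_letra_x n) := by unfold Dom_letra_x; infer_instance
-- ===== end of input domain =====

-- B builds each row as a uniform blank buffer with '*' written at columns i and n-1-i,
-- replacing A's three-branch run-length arithmetic; equal return value on every Int input.

-- ===== PORT A =====
-- ' '*k on chars: PySem.List.pyRepeat [' '] k; int((n-1)/2) is PySem.Int.truncdiv (n-1) 2 (exact for |n| ≤ 2^31)
def letra_x (n : Int) : String :=
  let n := if PySem.Int.mod n 2 = 0 then n + 1 else n
  String.ofList ((PySem.List.pyRange 0 n).foldl (fun linea i =>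
    let limite_sup := PySem.Int.truncdiv (n - 1) 2
    let centro := PySem.Int.truncdiv (n - 1) 2
    let limite_inf := centro + 1
    if 0 ≤ i ∧ i < limite_sup then
      let extremos := i
      let espacios_usados := 2 * extremos + 2
      let centro := n - espacios_usados
      linea ++ PySem.List.pyRepeat [' '] extremos ++ ['*'] ++ PySem.List.pyRepeat [' '] centro ++ ['*'] ++ ['\n']
    else if i = centro then
      let extremos := i
      linea ++ PySem.List.pyRepeat [' '] extremos ++ ['*'] ++ ['\n']
    else if limite_inf ≤ i ∧ i < n then
      let extremos := n - i - 1
      let espacios_usados := 2 * extremos + 2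
      let centro := n - espacios_usados
      linea ++ PySem.List.pyRepeat [' '] extremos ++ ['*'] ++ PySem.List.pyRepeat [' '] centro ++ ['*'] ++ ['\n']
    else linea) [])

-- ===== PORT B =====
-- the ASCII byte row is ported as its decoded char list: bytearray(b' ')*(w) is
-- List.replicate w.toNat ' ', and row[i] = 42 / row[k] = 42 (byte 42 = '*', in-range
-- nonnegative indices: inside the loop 0 <= i, k < max i k + 1) is List.set at .toNat;
-- row.decode() + '\n' is the row with '\n' appended -- exact on this ASCII-only data
def letra_x_alt (n : Int) : String :=
  let n := if PySem.Int.mod n 2 = 0 then n + 1 else n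
  String.ofList (((PySem.List.pyRange 0 n).foldl (fun out i =>
    let k := n - 1 - i
    let row := ((List.replicate (max i k + 1).toNat ' ').set i.toNat '*').set k.toNat '*'
    out ++ [row ++ ['\n']]) []).flatten)

-- ===== PRECONDITION & SPEC =====
def Spec_letra_x (n : Int) (out : String) : Prop := out = letra_x_alt n
instance (n : Int) (out : String) : Decidable (Spec_letra_x n out) := by unfold Spec_letra_x; infer_instance

-- ===== CLAIM (what is proved, stated in full; the proofs are below) =====
def Claim_equal_letra_x : Prop := ∀ (n : Int), Dom_letra_x n → Spec_letra_x n (letra_x n)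

-- ===== LEMMAS AND PROOFS =====

lemma set_repl (L A : Nat) (h : A < L) :
    (List.replicate L ' ').set A '*' = List.replicate A ' ' ++ '*' :: List.replicate (L - A - 1) ' ' := by
  rw [List.set_eq_take_append_cons_drop, if_pos (by simpa using h)]
  rw [List.take_replicate, List.drop_replicate]
  congr 2
  omega

-- B's blank row with both marks written, smaller column A then larger column B
lemma row_set_runs (A B : Nat) (h : A < B) :
    ((List.replicate (B + 1) ' ').set A '*').set B '*'
      = List.replicate A ' ' ++ ['*'] ++ List.replicate (B - A - 1) ' ' ++ ['*'] := by
  rw [set_repl (B + 1) A (by omega)]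
  have e1 : B + 1 - A - 1 = (B - A - 1) + 1 := by omega
  rw [e1, List.replicate_succ']
  have e2 : List.replicate A ' ' ++ '*' :: (List.replicate (B - A - 1) ' ' ++ [' '])
      = (List.replicate A ' ' ++ '*' :: List.replicate (B - A - 1) ' ') ++ [' '] := by
    simp
  rw [e2, List.set_append_right _ _ (by simp; omega)]
  have e3 : B - (List.replicate A ' ' ++ '*' :: List.replicate (B - A - 1) ' ').length = 0 := by
    simp; omega
  rw [e3]
  simp

-- the middle row: both marks land on the same cell
lemma row_set_single (A : Nat) :
    ((List.replicate (A + 1) ' ').set A '*').set A '*'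
      = List.replicate A ' ' ++ ['*'] := by
  rw [set_repl (A + 1) A (by omega)]
  have e0 : A + 1 - A - 1 = 0 := by omega
  rw [e0, List.replicate_zero]
  rw [List.set_append_right _ _ (by simp)]
  simp

lemma rows_eq (m : Int) (hm : 0 < m) (hodd : PySem.Int.mod m 2 = 1) (i : Int)
    (hi : i ∈ PySem.List.pyRange 0 m) :
    (let limite_sup := PySem.Int.truncdiv (m - 1) 2
     let centro := PySem.Int.truncdiv (m - 1) 2
     let limite_inf := centro + 1
     if 0 ≤ i ∧ i < limite_sup then
       PySem.List.pyRepeat [' '] i ++ ['*'] ++ PySem.List.pyRepeat [' '] (m - (2 * i + 2)) ++ ['*'] ++ ['\n']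
     else if i = centro then
       PySem.List.pyRepeat [' '] i ++ ['*'] ++ ['\n']
     else if limite_inf ≤ i ∧ i < m then
       PySem.List.pyRepeat [' '] (m - i - 1) ++ ['*'] ++ PySem.List.pyRepeat [' '] (m - (2 * (m - i - 1) + 2)) ++ ['*'] ++ ['\n']
     else [])
    = ((List.replicate (max i (m - 1 - i) + 1).toNat ' ').set i.toNat '*').set (m - 1 - i).toNat '*'
        ++ ['\n'] := by
  rw [PySem.List.mem_pyRange_one] at hi
  rw [PySem.Int.mod_eq_emod_of_pos (by omega : (0:Int) < 2)] at hodd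
  obtain ⟨c, hc⟩ : ∃ c, m = 2 * c + 1 := ⟨(m - 1) / 2, by omega⟩
  have hc0 : 0 ≤ c := by omega
  have htd : PySem.Int.truncdiv (m - 1) 2 = c := by
    have h1 : m - 1 = 2 * c := by omega
    rw [h1]; simp [PySem.Int.truncdiv]
  simp only [htd, PySem.List.pyRepeat_singleton]
  by_cases h1 : i < c
  · rw [if_pos ⟨hi.1, h1⟩, max_eq_right (by omega : i ≤ m - 1 - i)]
    have eL : (max i (m - 1 - i) + 1).toNat = (m - 1 - i).toNat + 1 := by omega
    rw [max_eq_right (by omega : i ≤ m - 1 - i)] at eL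
    rw [eL, row_set_runs i.toNat (m - 1 - i).toNat (by omega)]
    have e : (m - 1 - i).toNat - i.toNat - 1 = (m - (2 * i + 2)).toNat := by omega
    rw [e]
  · by_cases h2 : i = c
    · rw [if_neg (by omega), if_pos h2]
      have e : m - 1 - i = i := by omega
      rw [e]
      have eL : (max i i + 1).toNat = i.toNat + 1 := by omega
      rw [eL, row_set_single i.toNat]
    · rw [if_neg (by omega), if_neg h2, if_pos ⟨by omega, hi.2⟩]
      have eL : (max i (m - 1 - i) + 1).toNat = i.toNat + 1 := by
        rw [max_eq_left (by omega : m - 1 - i ≤ i)]; omega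
      rw [eL, List.set_comm _ _ (by omega : i.toNat ≠ (m - 1 - i).toNat)]
      rw [row_set_runs (m - 1 - i).toNat i.toNat (by omega)]
      have e2 : i.toNat - (m - 1 - i).toNat - 1 = (m - (2 * (m - i - 1) + 2)).toNat := by omega
      rw [e2]
      have e1 : (m - 1 - i).toNat = (m - i - 1).toNat := by omega
      rw [e1]

lemma body_eq (m : Int) (hodd : PySem.Int.mod m 2 = 1) :
    ((PySem.List.pyRange 0 m).foldl (fun linea i =>
      let limite_sup := PySem.Int.truncdiv (m - 1) 2
      let centro := PySem.Int.truncdiv (m - 1) 2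
      let limite_inf := centro + 1
      if 0 ≤ i ∧ i < limite_sup then
        let extremos := i
        let espacios_usados := 2 * extremos + 2
        let centro := m - espacios_usados
        linea ++ PySem.List.pyRepeat [' '] extremos ++ ['*'] ++ PySem.List.pyRepeat [' '] centro ++ ['*'] ++ ['\n']
      else if i = centro then
        let extremos := i
        linea ++ PySem.List.pyRepeat [' '] extremos ++ ['*'] ++ ['\n']
      else if limite_inf ≤ i ∧ i < m then
        let extremos := m - i - 1
        let espacios_usados := 2 * extremos + 2
        let centro := m - espacios_usados
        linea ++ PySem.List.pyRepeat [' '] extremos ++ ['*'] ++ PySem.List.pyRepeat [' '] centro ++ ['*'] ++ ['\n']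
      else linea) ([] : List Char))
    = ((PySem.List.pyRange 0 m).foldl (fun out i =>
        let k := m - 1 - i
        let row := ((List.replicate (max i k + 1).toNat ' ').set i.toNat '*').set k.toNat '*'
        out ++ [row ++ ['\n']]) ([] : List (List Char))).flatten := by
  have hbody : (fun (linea : List Char) (i : Int) =>
      let limite_sup := PySem.Int.truncdiv (m - 1) 2
      let centro := PySem.Int.truncdiv (m - 1) 2
      let limite_inf := centro + 1
      if 0 ≤ i ∧ i < limite_sup then
        let extremos := i
        let espacios_usados := 2 * extremos + 2
        let centro := m - espacios_usados
        linea ++ PySem.List.pyRepeat [' '] extremos ++ ['*'] ++ PySem.List.pyRepeat [' '] centro ++ ['*'] ++ ['\n']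
      else if i = centro then
        let extremos := i
        linea ++ PySem.List.pyRepeat [' '] extremos ++ ['*'] ++ ['\n']
      else if limite_inf ≤ i ∧ i < m then
        let extremos := m - i - 1
        let espacios_usados := 2 * extremos + 2
        let centro := m - espacios_usados
        linea ++ PySem.List.pyRepeat [' '] extremos ++ ['*'] ++ PySem.List.pyRepeat [' '] centro ++ ['*'] ++ ['\n']
      else linea)
      = (fun (linea : List Char) (i : Int) => linea ++
        (let limite_sup := PySem.Int.truncdiv (m - 1) 2
         let centro := PySem.Int.truncdiv (m - 1) 2
         let limite_inf := centro + 1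
         if 0 ≤ i ∧ i < limite_sup then
           PySem.List.pyRepeat [' '] i ++ ['*'] ++ PySem.List.pyRepeat [' '] (m - (2 * i + 2)) ++ ['*'] ++ ['\n']
         else if i = centro then
           PySem.List.pyRepeat [' '] i ++ ['*'] ++ ['\n']
         else if limite_inf ≤ i ∧ i < m then
           PySem.List.pyRepeat [' '] (m - i - 1) ++ ['*'] ++ PySem.List.pyRepeat [' '] (m - (2 * (m - i - 1) + 2)) ++ ['*'] ++ ['\n']
         else [])) := by
    funext linea i
    simp only []
    split_ifs <;> simp
  rw [hbody, PySem.List.foldl_append_eq_flatMap, List.nil_append, List.flatMap_def]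
  rw [show (fun (out : List (List Char)) (i : Int) =>
        let k := m - 1 - i
        let row := ((List.replicate (max i k + 1).toNat ' ').set i.toNat '*').set k.toNat '*'
        out ++ [row ++ ['\n']])
      = (fun (out : List (List Char)) (i : Int) => out ++
        [((List.replicate (max i (m - 1 - i) + 1).toNat ' ').set i.toNat '*').set (m - 1 - i).toNat '*' ++ ['\n']])
    from rfl]
  rw [PySem.List.foldl_append_singleton_eq_map, List.nil_append]
  apply congrArg
  apply List.map_congr_left
  intro i hi
  have hm : 0 < m := by
    rw [PySem.List.mem_pyRange_one] at hi; omega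
  exact rows_eq m hm hodd i hi

-- ===== VERDICT (by name: the statement is the Claim_ definition above) =====
theorem letra_x_spec : Claim_equal_letra_x := by
  intro n _
  unfold Spec_letra_x letra_x letra_x_alt
  by_cases h : PySem.Int.mod n 2 = 0
  · simp only [if_pos h]
    exact congrArg String.ofList (body_eq (n + 1) (by
      rw [PySem.Int.mod_eq_emod_of_pos (by omega : (0:Int) < 2)] at h ⊢
      omega))
  · simp only [if_neg h]
    exact congrArg String.ofList (body_eq n (by
      rw [PySem.Int.mod_eq_emod_of_pos (by omega : (0:Int) < 2)] at h ⊢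
      omega))
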